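-- pv_equiv track=rewrite | github.com/charanvarma2016/Python-Assignments | Assignment_1/Q6.py | max_sum_tuple
-- ===== SOURCE A (Python) =====
-- def max_sum_tuple(tuples_list):
--     # Start with the first tuple as the max
--     max_tuple = tuples_list[0]
--     max_sum = sum(max_tuple)
--
--     # Loop through the rest of the tuples
--     for t in tuples_list[1:]:
--         current_sum = sum(t)
--         if current_sum > max_sum:
--             max_sum = current_sum
--             max_tuple = t
--
--     return max_tuple
-- ===== SOURCE B (Python) =====
-- def max_sum_tuple(tuples_list):
--     # Compute all sums once, then select the element at the first index of the maximum sum.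
--     sums = [sum(t) for t in tuples_list]
--     return tuples_list[sums.index(max(sums))]
-- ===== Notes on version B (the rewrite author's own statement) =====
-- stated objective: idiomatic
-- what changed: Replaces the explicit running-max loop over (max_tuple, max_sum) state by a sums-list comprehension followed by library max() and .index() to select the first element attaining the maximal sum.
import Mathlib
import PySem

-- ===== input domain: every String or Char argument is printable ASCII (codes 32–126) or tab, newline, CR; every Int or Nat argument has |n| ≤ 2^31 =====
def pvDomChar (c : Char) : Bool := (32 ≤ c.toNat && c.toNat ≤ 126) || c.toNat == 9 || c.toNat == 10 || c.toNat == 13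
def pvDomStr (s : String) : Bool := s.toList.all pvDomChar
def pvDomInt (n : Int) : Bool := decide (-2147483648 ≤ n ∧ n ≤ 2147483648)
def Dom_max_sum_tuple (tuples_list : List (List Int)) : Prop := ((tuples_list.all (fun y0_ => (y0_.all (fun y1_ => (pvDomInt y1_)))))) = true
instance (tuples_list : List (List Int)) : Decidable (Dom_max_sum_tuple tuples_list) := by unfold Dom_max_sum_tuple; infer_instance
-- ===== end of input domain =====

-- B replaces A's explicit running-max loop by an idiomatic sums-list + max() + .index() selection (same cost).


-- ===== PORT A =====
-- A's loop body: state (max_tuple, max_sum)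
def maxSumStep (st : List Int × Int) (t : List Int) : List Int × Int :=
  let current_sum := t.sum
  if current_sum > st.2 then (t, current_sum) else st

def max_sum_tuple (tuples_list : List (List Int)) : List Int :=
  match PySem.List.pyGet? tuples_list 0 with
  | none => []  -- IndexError on tuples_list[0]; excluded by Pre_
  | some max_tuple =>
    ((PySem.List.slice tuples_list (some 1) none).foldl maxSumStep (max_tuple, max_tuple.sum)).1

-- ===== PORT B =====
def max_sum_tuple_alt (tuples_list : List (List Int)) : List Int :=
  let sums := tuples_list.map (fun t => t.sum)
  match PySem.List.max? sums (fun y => y) with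
  | none => []  -- ValueError: max() of empty sequence; excluded by Pre_
  | some m =>
    match PySem.List.index? sums m with
    | none => []  -- unreachable: m ∈ sums
    | some i => PySem.List.pyGetD tuples_list (i : Int) []

-- ===== PRECONDITION & SPEC =====
-- A raises IndexError on the empty list (and B's max() raises ValueError there); nothing else is excluded.
def Pre_max_sum_tuple (tuples_list : List (List Int)) : Prop := tuples_list ≠ []
instance (tuples_list : List (List Int)) : Decidable (Pre_max_sum_tuple tuples_list) := by unfold Pre_max_sum_tuple; infer_instance
def pvWitness_max_sum_tuple : List (List Int) := [[1, 2], [3], [0, 3]]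

def Spec_max_sum_tuple (tuples_list : List (List Int)) (out : List Int) : Prop := out = max_sum_tuple_alt tuples_list
instance (tuples_list : List (List Int)) (out : List Int) : Decidable (Spec_max_sum_tuple tuples_list out) := by unfold Spec_max_sum_tuple; infer_instance

-- ===== CLAIM (what is proved, stated in full; the proofs are below) =====
def Claim_equal_max_sum_tuple : Prop := ∀ (tuples_list : List (List Int)), Dom_max_sum_tuple tuples_list → Pre_max_sum_tuple tuples_list → Spec_max_sum_tuple tuples_list (max_sum_tuple tuples_list)

-- ===== LEMMAS AND PROOFS =====

-- A's fold returns the FIRST element of a :: l attaining the maximal sum.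
theorem foldA_spec (l : List (List Int)) : ∀ (a : List Int),
    ∃ r pre suf, l.foldl maxSumStep (a, a.sum) = (r, r.sum) ∧
      a :: l = pre ++ r :: suf ∧
      (∀ p ∈ pre, p.sum < r.sum) ∧
      (∀ q ∈ a :: l, q.sum ≤ r.sum) := by
  induction l with
  | nil =>
    intro a
    exact ⟨a, [], [], rfl, rfl, by simp, by simp⟩
  | cons t l ih =>
    intro a
    simp only [List.foldl_cons]
    by_cases h : t.sum > a.sum
    · have hstep : maxSumStep (a, a.sum) t = (t, t.sum) := by
        simp [maxSumStep, h]
      obtain ⟨r, pre, suf, hfold, hdec, hpre, hmax⟩ := ih t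
      refine ⟨r, a :: pre, suf, by rw [hstep]; exact hfold, by simp [← hdec], ?_, ?_⟩
      · intro p hp
        rcases List.mem_cons.mp hp with he | hp
        · rw [he]
          calc a.sum < t.sum := h
            _ ≤ r.sum := hmax t (by simp)
        · exact hpre p hp
      · intro q hq
        rcases List.mem_cons.mp hq with he | hq
        · rw [he]; exact le_of_lt (lt_of_lt_of_le h (hmax t (by simp)))
        · exact hmax q hq
    · have hstep : maxSumStep (a, a.sum) t = (a, a.sum) := by
        simp [maxSumStep, h]
      obtain ⟨r, pre, suf, hfold, hdec, hpre, hmax⟩ := ih a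
      rw [hstep]
      cases pre with
      | nil =>
        -- r = a, first position
        have ha : a = r ∧ l = suf := by
          simpa using hdec
        refine ⟨r, [], t :: suf, hfold, by simp [← ha.1, ← ha.2], by simp, ?_⟩
        intro q hq
        have hr : r.sum = a.sum := by rw [ha.1]
        rcases List.mem_cons.mp hq with he | hq
        · rw [he, ← ha.1]
        · rcases List.mem_cons.mp hq with he | hq
          · rw [he, hr]; exact not_lt.mp h
          · exact hmax q (List.mem_cons_of_mem a hq)
      | cons p0 pre' =>
        have hp0 : p0 = a ∧ l = pre' ++ r :: suf := by
          constructor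
          · have := congrArg (fun xs => xs.headI) hdec; simpa using this.symm
          · have := congrArg List.tail hdec; simpa using this
        refine ⟨r, a :: t :: pre', suf, hfold, by simp [hp0.2], ?_, ?_⟩
        · intro p hp
          have hasum : a.sum < r.sum := by
            have := hpre p0 (by simp); rw [hp0.1] at this; exact this
          rcases List.mem_cons.mp hp with he | hp
          · rw [he]; exact hasum
          · rcases List.mem_cons.mp hp with he | hp
            · rw [he]; exact lt_of_le_of_lt (not_lt.mp h) hasum
            · exact hpre p (List.mem_cons_of_mem p0 hp)
        · intro q hq
          rcases List.mem_cons.mp hq with he | hq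
          · rw [he]; exact hmax a (by simp)
          · rcases List.mem_cons.mp hq with he | hq
            · rw [he]; exact le_trans (not_lt.mp h) (hmax a (by simp))
            · exact hmax q (List.mem_cons_of_mem a hq)

-- ===== VERDICT (by name: the statement is the Claim_ definition above) =====
theorem max_sum_tuple_spec : Claim_equal_max_sum_tuple := by
  intro xs _ hpre
  unfold Spec_max_sum_tuple
  cases xs with
  | nil => exact absurd rfl hpre
  | cons a l =>
    obtain ⟨r, pre, suf, hfold, hdec, hpre', hmax⟩ := foldA_spec l a
    -- A's side
    have hA : max_sum_tuple (a :: l) = r := by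
      unfold max_sum_tuple
      rw [show PySem.List.pyGet? (a :: l) 0 = some a from by
            simp,
          PySem.List.slice_from_one]
      simp [hfold]
    rw [hA]
    -- B's side
    unfold max_sum_tuple_alt
    have hmem : r ∈ a :: l := by rw [hdec]; simp
    have hsums : (a :: l).map (fun t => t.sum) =
        pre.map (fun t => t.sum) ++ r.sum :: suf.map (fun t => t.sum) := by
      rw [hdec]; simp
    -- the maximum of sums is r.sum
    have hMax : PySem.List.max? ((a :: l).map (fun t => t.sum)) (fun y => y) = some r.sum := by
      cases hmm : PySem.List.max? ((a :: l).map (fun t => t.sum)) (fun y => y) with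
      | none => rw [PySem.List.max?_eq_none_iff] at hmm; simp at hmm
      | some m =>
        have hmmem := PySem.List.max?_mem hmm
        have hle : m ≤ r.sum := by
          obtain ⟨q, hq, hqe⟩ := List.mem_map.mp hmmem
          rw [← hqe]; exact hmax q hq
        have hge : r.sum ≤ m := by
          have := PySem.List.max?_isMax hmm r.sum (List.mem_map.mpr ⟨r, hmem, rfl⟩)
          simpa using this
        rw [le_antisymm hle hge]
    have hnotin : r.sum ∉ pre.map (fun t => t.sum) := by
      intro hin
      obtain ⟨p, hp, hpe⟩ := List.mem_map.mp hin
      exact absurd hpe (ne_of_lt (hpre' p hp))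
    have hidx : PySem.List.index? ((a :: l).map (fun t => t.sum)) r.sum = some pre.length := by
      rw [PySem.List.index?_eq_some_iff]
      exact ⟨pre.map (fun t => t.sum), suf.map (fun t => t.sum), hsums, by simp, hnotin⟩
    simp only [hMax, hidx]
    rw [PySem.List.pyGetD_natCast, hdec]
    simp [List.getD]
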